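-- pv_equiv track=rewrite | github.com/0noketa/tobf | tobf/base.py | calc_small_pair
-- ===== SOURCE A (Python) =====
-- def calc_small_pair(n, vs):
--     """n: result0 * result1\n
--     vs: num of vars\n
--     {result0} > {result1}\n
--     usage: +{result0}[>+{result1}<-]"""
--
--     n = n % 256
--     x = 1
--     y = 256
--     s = 256
--     for i in range(1, 256):
--         if n % i == 0:
--             j = n // i
--             s2 = int(i + j * vs)
--
--             if s2 < s:
--                 x = i
--                 y = j
--                 s = s2
--
--     return (max(x, y), min(x, y))
-- ===== SOURCE B (Python) =====
-- def calc_small_pair(n, vs):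
--     """n: result0 * result1\n
--     vs: num of vars\n
--     {result0} > {result1}\n
--     usage: +{result0}[>+{result1}<-]"""
--
--     n = n % 256
--     if n == 0:
--         return (1, 0)
--     s, x, y = 256, 1, 256
--     d = 1
--     while d * d <= n:
--         if n % d == 0:
--             q = n // d
--             s2 = d + q * vs
--             if s2 < s or (s2 == s and d < x):
--                 s, x, y = s2, d, q
--             if q != d:
--                 s2 = q + d * vs
--                 if s2 < s or (s2 == s and q < x):
--                     s, x, y = s2, q, d
--         d += 1
--     return (max(x, y), min(x, y))
-- ===== Notes on version B (the rewrite author's own statement) =====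
-- stated objective: alternative
-- what changed: Instead of scanning every i in 1..255 and keeping the first strict cost minimum, B enumerates divisors d of n%256 only up to its square root, considers both ordered factor pairs for each such d with a lexicographic (cost, then smaller factor) tie-break that reproduces A's ascending first-minimum rule, and special-cases a zero residue; it does ~16 loop iterations instead of 255, though per-call time is too small for a timing run to confirm a speedup.
import Mathlib
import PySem

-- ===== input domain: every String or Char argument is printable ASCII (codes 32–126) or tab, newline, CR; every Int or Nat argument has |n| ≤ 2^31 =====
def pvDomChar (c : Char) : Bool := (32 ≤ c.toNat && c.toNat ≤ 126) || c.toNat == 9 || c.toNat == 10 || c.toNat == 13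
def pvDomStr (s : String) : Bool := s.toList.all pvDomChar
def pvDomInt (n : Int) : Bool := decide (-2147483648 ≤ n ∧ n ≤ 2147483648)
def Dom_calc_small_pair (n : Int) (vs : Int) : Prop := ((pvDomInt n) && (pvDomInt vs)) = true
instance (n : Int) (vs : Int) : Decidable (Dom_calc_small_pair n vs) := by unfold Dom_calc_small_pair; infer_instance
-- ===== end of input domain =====

-- B replaces A's full scan of i = 1..255 by enumerating divisors d of n%256 only up to its square
-- root (taking both ordered factor pairs) with a lexicographic (cost, i) tie-break reproducing A's
-- ascending first-minimum rule; objective: alternative (fewer loop iterations, speedup not measured).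

-- ===== PORT A =====
-- loop body of A's for-loop; state is (x, y, s)
def aStep (m vs : Int) (st : Int × Int × Int) (i : Int) : Int × Int × Int :=
  if PySem.Int.mod m i == 0 then
    let j := PySem.Int.floordiv m i
    let s2 := i + j * vs
    if s2 < st.2.2 then (i, j, s2) else st
  else st

def calc_small_pair (n : Int) (vs : Int) : Int × Int :=
  let m := PySem.Int.mod n 256
  let st := (PySem.List.pyRange 1 256 1).foldl (aStep m vs) (1, 256, 256)
  (max st.1 st.2.1, min st.1 st.2.1)

-- ===== PORT B =====
-- the repeated update block of B's loop; state is (s, x, y)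
def bStep (vs : Int) (st : Int × Int × Int) (i j : Int) : Int × Int × Int :=
  let s2 := i + j * vs
  if s2 < st.1 ∨ (s2 = st.1 ∧ i < st.2.1) then (s2, i, j) else st

-- B's while-loop, recursion on d with guard d*d ≤ m
def bLoop (m vs d : Int) (st : Int × Int × Int) : Int × Int × Int :=
  if d * d ≤ m then
    let st' :=
      if PySem.Int.mod m d == 0 then
        let q := PySem.Int.floordiv m d
        let st1 := bStep vs st d q
        if q ≠ d then bStep vs st1 q d else st1
      else st
    bLoop m vs (d + 1) st'
  else st
termination_by (m + 1 - d).toNat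
decreasing_by
  rename_i h
  have hdm : d ≤ m := by nlinarith [mul_self_nonneg d, mul_self_nonneg (d - 1)]
  omega

def calc_small_pair_alt (n : Int) (vs : Int) : Int × Int :=
  let m := PySem.Int.mod n 256
  if m == 0 then (1, 0)
  else
    let st := bLoop m vs 1 (256, 1, 256)
    (max st.2.1 st.2.2, min st.2.1 st.2.2)

-- ===== PRECONDITION & SPEC =====
def Spec_calc_small_pair (n : Int) (vs : Int) (out : Int × Int) : Prop := out = calc_small_pair_alt n vs
instance (n : Int) (vs : Int) (out : Int × Int) : Decidable (Spec_calc_small_pair n vs out) := by unfold Spec_calc_small_pair; infer_instance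

-- ===== CLAIM (what is proved, stated in full; the proofs are below) =====
def Claim_equal_calc_small_pair : Prop := ∀ (n : Int) (vs : Int), Dom_calc_small_pair n vs → Spec_calc_small_pair n vs (calc_small_pair n vs)

-- ===== LEMMAS AND PROOFS =====

-- reference candidate list: the divisor pairs A scans, in ascending i
def cpairs (m : Int) : List (Int × Int) :=
  ((PySem.List.pyRange 1 256 1).filter (fun i => PySem.Int.mod m i == 0)).map
    (fun i => (i, PySem.Int.floordiv m i))

-- candidate triple (cost, i, j)
def ctrip (vs : Int) (p : Int × Int) : Int × Int × Int := (p.1 + p.2 * vs, p.1, p.2)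

-- A's update: strictly smaller cost wins
def updA (st c : Int × Int × Int) : Int × Int × Int := if c.1 < st.1 then c else st

-- lexicographic order on (cost, i)
abbrev keyLt (c st : Int × Int × Int) : Prop := c.1 < st.1 ∨ (c.1 = st.1 ∧ c.2.1 < st.2.1)

-- B's update
def updL (st c : Int × Int × Int) : Int × Int × Int := if keyLt c st then c else st

-- fuel-indexed version of the divisor-pair list B's loop enumerates
def bpairsF : Nat → Int → Int → List (Int × Int)
  | 0, _, _ => []
  | fuel + 1, m, d =>
    if d * d ≤ m then
      (if PySem.Int.mod m d == 0 then
         (let q := PySem.Int.floordiv m d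
          if q ≠ d then [(d, q), (q, d)] else [(d, q)])
       else []) ++ bpairsF fuel m (d + 1)
    else []

theorem bStep_eq_updL (vs : Int) (st : Int × Int × Int) (i j : Int) :
    bStep vs st i j = updL st (ctrip vs (i, j)) := rfl

theorem bLoop_eq_fold (m vs : Int) : ∀ (fuel : Nat) (d : Int) (st : Int × Int × Int),
    1 ≤ d → (m + 1 - d).toNat ≤ fuel →
    bLoop m vs d st = ((bpairsF fuel m d).map (ctrip vs)).foldl updL st := by
  intro fuel
  induction fuel with
  | zero =>
    intro d st hd hf
    rw [bLoop]
    have hgt : ¬ (d * d ≤ m) := by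
      intro hle
      have : m + 1 ≤ d := by omega
      nlinarith
    simp [hgt, bpairsF]
  | succ fuel ih =>
    intro d st hd hf
    rw [bLoop, bpairsF]
    by_cases hdd : d * d ≤ m
    · have hdm : d ≤ m := by nlinarith
      have hf' : (m + 1 - (d + 1)).toNat ≤ fuel := by omega
      simp only [hdd, if_true, List.map_append, List.foldl_append]
      by_cases hmod : PySem.Int.mod m d == 0
      · by_cases hq : PySem.Int.floordiv m d ≠ d
        · simp only [if_pos hmod, if_pos hq, bStep_eq_updL, List.map_cons, List.map_nil,
            List.foldl_cons, List.foldl_nil]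
          exact ih (d + 1) _ (by omega) hf'
        · simp only [if_pos hmod, if_neg hq, bStep_eq_updL, List.map_cons, List.map_nil,
            List.foldl_cons, List.foldl_nil]
          exact ih (d + 1) _ (by omega) hf'
      · simp only [if_neg hmod, List.map_nil, List.foldl_nil]
        exact ih (d + 1) _ (by omega) hf'
    · simp [hdd]

-- A's fold, with the state reshaped from (x, y, s) to (s, x, y), is a conditional updA-fold
theorem aFold_reshape (m vs : Int) : ∀ (L : List Int) (x y s : Int),
    L.foldl (aStep m vs) (x, y, s) =
      (let t := L.foldl (fun st i => if PySem.Int.mod m i == 0 then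
          updA st (ctrip vs (i, PySem.Int.floordiv m i)) else st) (s, x, y)
       (t.2.1, t.2.2, t.1)) := by
  intro L
  induction L with
  | nil => intro x y s; rfl
  | cons a L ih =>
    intro x y s
    simp only [List.foldl]
    by_cases hmod : PySem.Int.mod m a == 0
    · simp only [aStep, updA, ctrip, hmod, if_true]
      by_cases hlt : a + PySem.Int.floordiv m a * vs < s
      · simp only [hlt, if_true]; exact ih _ _ _
      · simp only [hlt, if_false]; exact ih _ _ _
    · simp only [aStep, updA, hmod, if_false]; exact ih _ _ _

-- the conditional updA-fold over the full range is the updA-fold over the candidate triples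
theorem aFold_cands (m vs : Int) (s x y : Int) :
    (PySem.List.pyRange 1 256 1).foldl (fun st i => if PySem.Int.mod m i == 0 then
        updA st (ctrip vs (i, PySem.Int.floordiv m i)) else st) (s, x, y)
      = ((cpairs m).map (ctrip vs)).foldl updA (s, x, y) := by
  rw [cpairs, List.map_map, List.foldl_map, ← List.foldl_filter]
  rfl

-- every element of cpairs m has second component m // first
theorem cpairs_snd (m : Int) (p : Int × Int) (hp : p ∈ cpairs m) :
    p.2 = PySem.Int.floordiv m p.1 := by
  simp only [cpairs, List.mem_map] at hp
  obtain ⟨i, _, rfl⟩ := hp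
  rfl

theorem keyLt_irrefl (a : Int × Int × Int) : ¬ keyLt a a := by
  unfold keyLt; omega

theorem keyLt_trans {a b c : Int × Int × Int} (h1 : keyLt a b) (h2 : keyLt b c) : keyLt a c := by
  unfold keyLt at *; omega

theorem keyLt_asymm {a b : Int × Int × Int} (h : keyLt a b) : ¬ keyLt b a := by
  unfold keyLt at *; omega

theorem keyLt_total {a b : Int × Int × Int} (h1 : ¬ keyLt a b) (h2 : ¬ keyLt b a) :
    a.1 = b.1 ∧ a.2.1 = b.2.1 := by
  unfold keyLt at *; omega

-- strict-cost update equals lexicographic update over a list ascending in i, all i ≥ current x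
theorem fold_strict_eq_lex : ∀ (L : List (Int × Int × Int)) (st : Int × Int × Int),
    L.Pairwise (fun a b => a.2.1 < b.2.1) → (∀ c ∈ L, st.2.1 ≤ c.2.1) →
    L.foldl updA st = L.foldl updL st := by
  intro L
  induction L with
  | nil => intro st _ _; rfl
  | cons a L ih =>
    intro st hpw hle
    have hpw' := (List.pairwise_cons.mp hpw).2
    have ha := (List.pairwise_cons.mp hpw).1
    simp only [List.foldl]
    by_cases hlt : a.1 < st.1
    · have h1 : updA st a = a := by simp [updA, hlt]
      have h2 : updL st a = a := by simp [updL, keyLt, hlt]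
      rw [h1, h2]
      exact ih a hpw' (fun c hc => le_of_lt (ha c hc))
    · have h1 : updA st a = st := by simp [updA, hlt]
      have hax : st.2.1 ≤ a.2.1 := hle a (List.mem_cons_self)
      have h2 : updL st a = st := by
        simp only [updL, keyLt]
        have : ¬ (a.1 < st.1 ∨ (a.1 = st.1 ∧ a.2.1 < st.2.1)) := by omega
        simp [this]
      rw [h1, h2]
      exact ih st hpw' (fun c hc => hle c (List.mem_cons_of_mem _ hc))

-- characterisation of the lexicographic fold: either nothing beats the seed, or the result is
-- a minimal element of the list that beats the seed
theorem fold_updL_spec : ∀ (L : List (Int × Int × Int)) (st : Int × Int × Int),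
    (L.foldl updL st = st ∧ ∀ c ∈ L, ¬ keyLt c st) ∨
    (∃ c ∈ L, L.foldl updL st = c ∧ keyLt c st ∧ ∀ c' ∈ L, ¬ keyLt c' c) := by
  intro L
  induction L with
  | nil => intro st; left; simp
  | cons a L ih =>
    intro st
    simp only [List.foldl]
    by_cases hka : keyLt a st
    · have hupd : updL st a = a := by simp [updL, hka]
      rw [hupd]
      rcases ih a with ⟨heq, hmin⟩ | ⟨c, hc, heq, hkc, hmin⟩
      · right
        exact ⟨a, List.mem_cons_self, heq, hka, by
          intro c' hc'
          rcases List.mem_cons.mp hc' with rfl | h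
          · exact keyLt_irrefl _
          · exact hmin c' h⟩
      · right
        refine ⟨c, List.mem_cons_of_mem _ hc, heq, keyLt_trans hkc hka, ?_⟩
        intro c' hc'
        rcases List.mem_cons.mp hc' with rfl | h
        · exact keyLt_asymm hkc
        · exact hmin c' h
    · have hupd : updL st a = st := by simp [updL, hka]
      rw [hupd]
      rcases ih st with ⟨heq, hmin⟩ | ⟨c, hc, heq, hkc, hmin⟩
      · left
        exact ⟨heq, by
          intro c hc
          rcases List.mem_cons.mp hc with rfl | h
          · exact hka
          · exact hmin c h⟩
      · right
        refine ⟨c, List.mem_cons_of_mem _ hc, heq, hkc, ?_⟩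
        intro c' hc'
        rcases List.mem_cons.mp hc' with rfl | h
        · intro hac; exact hka (keyLt_trans hac hkc)
        · exact hmin c' h

-- the lexicographic fold is permutation-invariant when (cost, i) determines the triple
theorem fold_updL_perm (L L' : List (Int × Int × Int)) (st : Int × Int × Int)
    (hperm : L.Perm L')
    (hinj : ∀ a ∈ L, ∀ b ∈ L, a.1 = b.1 → a.2.1 = b.2.1 → a = b) :
    L.foldl updL st = L'.foldl updL st := by
  rcases fold_updL_spec L st with ⟨heq, hmin⟩ | ⟨c, hc, heq, hkc, hmin⟩ <;>
    rcases fold_updL_spec L' st with ⟨heq', hmin'⟩ | ⟨c', hc', heq', hkc', hmin'⟩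
  · rw [heq, heq']
  · exact absurd hkc' (hmin c' (hperm.symm.subset hc'))
  · exact absurd hkc (hmin' c (hperm.subset hc))
  · rw [heq, heq']
    have h1 : ¬ keyLt c' c := hmin c' (hperm.symm.subset hc')
    have h2 : ¬ keyLt c c' := hmin' c (hperm.subset hc)
    obtain ⟨e1, e2⟩ := keyLt_total h2 h1
    exact hinj c hc c' (hperm.symm.subset hc') e1 e2

-- key-injectivity of the candidate triples
theorem cands_inj (m vs : Int) :
    ∀ a ∈ (cpairs m).map (ctrip vs), ∀ b ∈ (cpairs m).map (ctrip vs),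
      a.1 = b.1 → a.2.1 = b.2.1 → a = b := by
  intro a ha b hb _ h2
  obtain ⟨p, hp, rfl⟩ := List.mem_map.mp ha
  obtain ⟨p', hp', rfl⟩ := List.mem_map.mp hb
  have e1 : p.1 = p'.1 := h2
  have : p = p' := by
    have := cpairs_snd m p hp
    have := cpairs_snd m p' hp'
    cases p; cases p'; simp_all
  rw [this]

-- per-residue facts, checked by computation: B's sqrt-enumeration is a permutation of A's
-- divisor list, which is ascending in i with all i ≥ 1
set_option maxRecDepth 100000 in
set_option maxHeartbeats 4000000 in
theorem perM : ∀ k ∈ List.range 255,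
    (bpairsF 256 ((k : Int) + 1) 1).Perm (cpairs ((k : Int) + 1)) := by decide

-- A's divisor list is strictly ascending in i
theorem cpairs_pairwise (m : Int) :
    List.Pairwise (fun a b : Int × Int => a.1 < b.1) (cpairs m) := by
  rw [cpairs, List.pairwise_map]
  exact List.Pairwise.filter _ (PySem.List.pairwise_lt_pyRange_one 1 256)

-- every i in A's divisor list is at least 1
theorem cpairs_fst_pos (m : Int) (p : Int × Int) (hp : p ∈ cpairs m) : 1 ≤ p.1 := by
  simp only [cpairs, List.mem_map, List.mem_filter] at hp
  obtain ⟨i, ⟨hi, _⟩, rfl⟩ := hp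
  exact (PySem.List.mem_pyRange_one.mp hi).1

-- the m = 0 candidate triples do not depend on vs
theorem cpairs_zero_map (vs : Int) :
    (cpairs 0).map (ctrip vs) = (cpairs 0).map (fun p => (p.1, p.1, (0 : Int))) := by
  apply List.map_congr_left
  intro p hp
  have h1 := cpairs_fst_pos 0 p hp
  have h2 := cpairs_snd 0 p hp
  have hz : p.2 = 0 := by
    rw [h2, PySem.Int.floordiv_eq_ediv_of_pos (by omega), Int.zero_ediv]
  simp [ctrip, hz]

theorem mod256_bounds (n : Int) : 0 ≤ PySem.Int.mod n 256 ∧ PySem.Int.mod n 256 < 256 := by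
  rw [PySem.Int.mod_eq_emod_of_pos (by norm_num)]
  exact ⟨Int.emod_nonneg n (by norm_num), Int.emod_lt_of_pos n (by norm_num)⟩

theorem A_closed (n vs : Int) : calc_small_pair n vs =
    (let t := ((cpairs (PySem.Int.mod n 256)).map (ctrip vs)).foldl updA (256, 1, 256)
     (max t.2.1 t.2.2, min t.2.1 t.2.2)) := by
  have h := aFold_reshape (PySem.Int.mod n 256) vs (PySem.List.pyRange 1 256 1) 1 256 256
  rw [aFold_cands] at h
  show (let st := (PySem.List.pyRange 1 256 1).foldl (aStep (PySem.Int.mod n 256) vs) (1, 256, 256)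
        (max st.1 st.2.1, min st.1 st.2.1)) = _
  rw [h]

set_option maxRecDepth 100000 in
set_option maxHeartbeats 1000000 in
theorem calc_eq (n vs : Int) : calc_small_pair n vs = calc_small_pair_alt n vs := by
  obtain ⟨hm0, hm256⟩ := mod256_bounds n
  rw [A_closed]
  by_cases hz : PySem.Int.mod n 256 = 0
  · have hB : calc_small_pair_alt n vs = (1, 0) := by
      simp only [calc_small_pair_alt, hz]
      rfl
    rw [hB, hz, cpairs_zero_map]
    decide
  · set m := PySem.Int.mod n 256 with hm
    have hk : m = ((m.toNat - 1 : Nat) : Int) + 1 := by omega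
    have hmem : (m.toNat - 1) ∈ List.range 255 := by
      simp only [List.mem_range]; omega
    have hperm := perM _ hmem
    rw [← hk] at hperm
    have hB : calc_small_pair_alt n vs =
        (let t := ((bpairsF 256 m 1).map (ctrip vs)).foldl updL (256, 1, 256)
         (max t.2.1 t.2.2, min t.2.1 t.2.2)) := by
      have hne : (m == 0) = false := by simp [hz]
      simp only [calc_small_pair_alt, ← hm, hne, Bool.false_eq_true, if_false]
      rw [bLoop_eq_fold m vs 256 1 (256, 1, 256) (by norm_num) (by omega)]
    rw [hB]
    have e1 : ((cpairs m).map (ctrip vs)).foldl updA (256, 1, 256)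
        = ((cpairs m).map (ctrip vs)).foldl updL (256, 1, 256) := by
      apply fold_strict_eq_lex
      · rw [List.pairwise_map]
        refine (cpairs_pairwise m).imp ?_
        intro a b h
        simpa [ctrip] using h
      · intro c hc
        obtain ⟨p, hp, rfl⟩ := List.mem_map.mp hc
        exact cpairs_fst_pos m p hp
    have e2 := fold_updL_perm ((cpairs m).map (ctrip vs)) ((bpairsF 256 m 1).map (ctrip vs))
      (256, 1, 256) ((hperm.map (ctrip vs)).symm) (cands_inj m vs)
    simp only [e1, e2]
-- ===== VERDICT (by name: the statement is the Claim_ definition above) =====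
theorem calc_small_pair_spec : Claim_equal_calc_small_pair := by
  intro n vs _
  unfold Spec_calc_small_pair
  exact calc_eq n vs
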